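-- pv_equiv track=rewrite | github.com/polsala/SPD01CryptYourMomma | utils/matrix_operations.py | create_dict_reverse_mapping_from_iterable
-- ===== SOURCE A (Python) =====
-- from collections.abc import Iterable
--
-- def create_matrix_from_iterable(n_rows, n_columns, iterable_l):
--     if not isinstance(iterable_l, Iterable):
--         raise Exception('You passed a non iterable!')
--
--     iterable_l = list(iterable_l)
--
--     if n_rows * n_columns != len(iterable_l):
--         raise Exception('That\s not possible ma friend %s X %s != %s' % (n_rows, n_columns, iterable_l))
--
--     return list(zip(*[iter(iterable_l)]*n_columns))
--
-- def create_dict_reverse_mapping_from_iterable(rows_code_list, columns_code_list, iterable_l):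
--     if not isinstance(rows_code_list, Iterable) or not isinstance(columns_code_list, Iterable):
--         raise Exception('You passed a non iterable as rows or columns code list!')
--
--     rows_code_list = list(rows_code_list)
--     columns_code_list = list(columns_code_list)
--     n_rows = len(rows_code_list)
--     n_columns = len(columns_code_list)
--
--     list_of_tuples = create_matrix_from_iterable(n_rows, n_columns, iterable_l)
--
--     res_dict = {}
--
--     for i in range(0, n_rows):
--         for j in range(0, n_columns):
--             values_to_be_mapped = list_of_tuples[i][j]
--             res_dict[rows_code_list[i], columns_code_list[j]] = values_to_be_mapped
--
--     return res_dict
-- ===== SOURCE B (Python) =====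
-- from collections.abc import Iterable
--
-- def create_dict_reverse_mapping_from_iterable(rows_code_list, columns_code_list, iterable_l):
--     if not isinstance(rows_code_list, Iterable) or not isinstance(columns_code_list, Iterable):
--         raise Exception('You passed a non iterable as rows or columns code list!')
--
--     rows_code_list = list(rows_code_list)
--     columns_code_list = list(columns_code_list)
--
--     if not isinstance(iterable_l, Iterable):
--         raise Exception('You passed a non iterable!')
--
--     iterable_l = list(iterable_l)
--     n_columns = len(columns_code_list)
--
--     if len(rows_code_list) * n_columns != len(iterable_l):
--         raise Exception('That\s not possible ma friend %s X %s != %s'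
--                         % (len(rows_code_list), n_columns, iterable_l))
--
--     res_dict = {}
--     for i, value in enumerate(iterable_l):
--         res_dict[rows_code_list[i // n_columns], columns_code_list[i % n_columns]] = value
--     return res_dict
-- ===== Notes on version B (the rewrite author's own statement) =====
-- stated objective: alternative
-- what changed: B drops the matrix reshaping and the nested row/column loops: it makes one flat pass over enumerate(iterable_l) and derives each key by index arithmetic (i // n_columns, i % n_columns), which reproduces the row-major insertion order.
import Mathlib
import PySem

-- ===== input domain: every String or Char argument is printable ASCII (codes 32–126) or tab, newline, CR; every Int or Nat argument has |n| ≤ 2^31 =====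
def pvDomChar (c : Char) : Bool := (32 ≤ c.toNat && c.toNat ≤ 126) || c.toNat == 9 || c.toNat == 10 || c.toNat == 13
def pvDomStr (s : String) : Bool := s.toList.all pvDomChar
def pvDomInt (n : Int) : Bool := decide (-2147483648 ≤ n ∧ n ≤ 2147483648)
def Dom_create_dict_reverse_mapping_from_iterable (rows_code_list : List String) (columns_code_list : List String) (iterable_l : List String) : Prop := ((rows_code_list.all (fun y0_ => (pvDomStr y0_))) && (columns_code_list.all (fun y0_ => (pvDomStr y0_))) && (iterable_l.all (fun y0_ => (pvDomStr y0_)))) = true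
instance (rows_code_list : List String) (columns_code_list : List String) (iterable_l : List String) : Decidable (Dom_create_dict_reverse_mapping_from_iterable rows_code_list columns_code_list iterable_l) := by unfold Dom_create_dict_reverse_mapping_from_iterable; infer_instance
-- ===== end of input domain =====

-- B replaces the reshape-into-matrix + nested index loops with one flat pass over
-- enumerate(iterable_l), deriving each key by index arithmetic i // n_columns, i % n_columns
-- (objective: alternative decomposition).
-- ===== grader-written input-domain preamble =====



-- ===== PORT A =====
-- 'list(zip(*[iter(l)]*n))': the full chunks of size n, in order (n = 0 gives zip() = []).
def pvChunk (n : Nat) (l : List String) : List (List String) :=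
  if _h : n = 0 ∨ l.length < n then []
  else l.take n :: pvChunk n (l.drop n)
termination_by l.length
decreasing_by
  simp only [List.length_drop]
  omega

-- helper of A; 'none' is exactly where the Python raises its Exception
def create_matrix_from_iterable (n_rows : Int) (n_columns : Int) (iterable_l : List String) : Option (List (List String)) :=
  if n_rows * n_columns ≠ (iterable_l.length : Int) then none
  else some (pvChunk n_columns.toNat iterable_l)

def create_dict_reverse_mapping_from_iterable (rows_code_list : List String) (columns_code_list : List String) (iterable_l : List String) : List (String × String × String) :=
  let n_rows : Int := rows_code_list.length
  let n_columns : Int := columns_code_list.length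
  match create_matrix_from_iterable n_rows n_columns iterable_l with
  | none => []  -- Python raises here (excluded by Pre_)
  | some list_of_tuples =>
    let res_dict := (PySem.List.pyRange 0 n_rows 1).foldl (fun d i =>
      (PySem.List.pyRange 0 n_columns 1).foldl (fun d j =>
        d.insert (PySem.List.pyGetD rows_code_list i "", PySem.List.pyGetD columns_code_list j "")
                 (PySem.List.pyGetD (PySem.List.pyGetD list_of_tuples i []) j "")) d)
      PySem.Dict.empty
    res_dict.items.map (fun p => (p.1.1, p.1.2, p.2))

-- ===== PORT B =====
-- one flat pass: key of the i-th value is (rows[i // n_columns], cols[i % n_columns])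
def create_dict_reverse_mapping_from_iterable_alt (rows_code_list : List String) (columns_code_list : List String) (iterable_l : List String) : List (String × String × String) :=
  let n_columns : Int := columns_code_list.length
  if rows_code_list.length * columns_code_list.length ≠ iterable_l.length then []  -- Python raises here (excluded by Pre_)
  else
    let res_dict := (PySem.List.enumerate iterable_l 0).foldl (fun d p =>
      d.insert (PySem.List.pyGetD rows_code_list (PySem.Int.floordiv p.1 n_columns) "",
                PySem.List.pyGetD columns_code_list (PySem.Int.mod p.1 n_columns) "") p.2)
      PySem.Dict.empty
    res_dict.items.map (fun p => (p.1.1, p.1.2, p.2))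

-- ===== PRECONDITION & SPEC =====
-- Pre_ excludes exactly the inputs on which A raises ('That\s not possible ma friend …'): a flat list
-- whose length is not n_rows * n_columns.
def Pre_create_dict_reverse_mapping_from_iterable (rows_code_list : List String) (columns_code_list : List String) (iterable_l : List String) : Prop :=
  rows_code_list.length * columns_code_list.length = iterable_l.length
instance (rows_code_list : List String) (columns_code_list : List String) (iterable_l : List String) : Decidable (Pre_create_dict_reverse_mapping_from_iterable rows_code_list columns_code_list iterable_l) := by unfold Pre_create_dict_reverse_mapping_from_iterable; infer_instance

def pvWitness_create_dict_reverse_mapping_from_iterable : List String × List String × List String :=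
  (["a", "b"], ["x", "y", "z"], ["1", "2", "3", "4", "5", "6"])

def Spec_create_dict_reverse_mapping_from_iterable (rows_code_list : List String) (columns_code_list : List String) (iterable_l : List String) (out : List (String × String × String)) : Prop := out = create_dict_reverse_mapping_from_iterable_alt rows_code_list columns_code_list iterable_l
instance (rows_code_list : List String) (columns_code_list : List String) (iterable_l : List String) (out : List (String × String × String)) : Decidable (Spec_create_dict_reverse_mapping_from_iterable rows_code_list columns_code_list iterable_l out) := by unfold Spec_create_dict_reverse_mapping_from_iterable; infer_instance

-- ===== CLAIM (what is proved, stated in full; the proofs are below) =====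
def Claim_equal_create_dict_reverse_mapping_from_iterable : Prop := ∀ (rows_code_list : List String) (columns_code_list : List String) (iterable_l : List String), Dom_create_dict_reverse_mapping_from_iterable rows_code_list columns_code_list iterable_l → Pre_create_dict_reverse_mapping_from_iterable rows_code_list columns_code_list iterable_l → Spec_create_dict_reverse_mapping_from_iterable rows_code_list columns_code_list iterable_l (create_dict_reverse_mapping_from_iterable rows_code_list columns_code_list iterable_l)

-- ===== LEMMAS AND PROOFS =====

-- one full chunk peels off
theorem pvChunk_cons (n : Nat) (l : List String) (hn : n ≠ 0) (hl : n ≤ l.length) :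
    pvChunk n l = l.take n :: pvChunk n (l.drop n) := by
  rw [pvChunk]
  simp only [dif_neg (by omega : ¬ (n = 0 ∨ l.length < n))]

-- one matrix row: indexing a row of length |cols| by range(|cols|) is the zip with the keys of that row
theorem pvRow_eq_zip (r : String) (cols row : List String) (h : row.length = cols.length) :
    (List.range cols.length).map (fun j => ((r, cols.getD j ""), row.getD j ""))
      = (cols.map (fun c => (r, c))).zip row := by
  induction cols generalizing row with
  | nil => simp
  | cons c cs ih =>
    cases row with
    | nil => simp at h
    | cons v vs =>
      simp only [List.length_cons, List.range_succ_eq_map, List.map_cons, List.map_map,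
        List.getD_cons_zero, List.zip_cons_cons]
      refine congrArg _ ?_
      rw [← ih vs (by simpa using h)]
      rfl

-- the flat index enumeration of the chunked matrix is the zip of the product keys with the flat list
theorem pvFlat_eq_zip (cols : List String) (rows l : List String)
    (h : l.length = rows.length * cols.length) (hc : cols.length ≠ 0) :
    (List.range rows.length).flatMap (fun i => (List.range cols.length).map (fun j =>
        ((rows.getD i "", cols.getD j ""), ((pvChunk cols.length l).getD i []).getD j "")))
      = (rows.flatMap (fun r => cols.map (fun c => (r, c)))).zip l := by
  induction rows generalizing l with
  | nil =>
    have : l = [] := by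
      cases l with
      | nil => rfl
      | cons x xs => simp at h
    simp [this]
  | cons r rs ih =>
    have hlen : cols.length ≤ l.length := by simp only [h, List.length_cons, Nat.succ_mul]; omega
    rw [pvChunk_cons cols.length l hc hlen]
    have hsplit : l = l.take cols.length ++ l.drop cols.length := (List.take_append_drop _ _).symm
    calc (List.range (r :: rs).length).flatMap (fun i => (List.range cols.length).map (fun j =>
            (((r :: rs).getD i "", cols.getD j ""), ((l.take cols.length :: pvChunk cols.length (l.drop cols.length)).getD i []).getD j "")))
        = (List.range cols.length).map (fun j => ((r, cols.getD j ""), (l.take cols.length).getD j ""))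
          ++ (List.range rs.length).flatMap (fun i => (List.range cols.length).map (fun j =>
              ((rs.getD i "", cols.getD j ""), ((pvChunk cols.length (l.drop cols.length)).getD i []).getD j ""))) := by
          simp only [List.length_cons, List.range_succ_eq_map, List.flatMap_cons, List.flatMap_map,
            List.getD_cons_zero, List.getD_cons_succ]
      _ = (cols.map (fun c => (r, c))).zip (l.take cols.length)
          ++ ((rs.flatMap (fun r => cols.map (fun c => (r, c)))).zip (l.drop cols.length)) := by
          rw [pvRow_eq_zip r cols (l.take cols.length) (by simp only [List.length_take]; omega),
            ih (l.drop cols.length) (by simp only [List.length_drop, h, List.length_cons, Nat.succ_mul]; omega)]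
      _ = ((r :: rs).flatMap (fun r => cols.map (fun c => (r, c)))).zip l := by
          conv_rhs => rw [hsplit]
          rw [List.flatMap_cons, List.zip_append (by simp; omega)]

-- B's flat index-arithmetic enumeration is that same zip of the product keys with the flat list
theorem pvDivmod_eq_zip (cols : List String) (rows l : List String)
    (h : l.length = rows.length * cols.length) (hc : cols.length ≠ 0) :
    (List.range l.length).map (fun i =>
        ((rows.getD (i / cols.length) "", cols.getD (i % cols.length) ""), l.getD i ""))
      = (rows.flatMap (fun r => cols.map (fun c => (r, c)))).zip l := by
  induction rows generalizing l with
  | nil =>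
    have : l = [] := by
      cases l with
      | nil => rfl
      | cons x xs => simp at h
    simp [this]
  | cons r rs ih =>
    have hcpos : 0 < cols.length := Nat.pos_of_ne_zero hc
    have hlen : cols.length ≤ l.length := by simp only [h, List.length_cons, Nat.succ_mul]; omega
    have hsplit : l = l.take cols.length ++ l.drop cols.length := (List.take_append_drop _ _).symm
    have hrange : List.range l.length
        = List.range cols.length ++ (List.range (l.drop cols.length).length).map (· + cols.length) := by
      rw [List.length_drop]
      have : l.length = cols.length + (l.length - cols.length) := by omega
      rw [this, List.range_add]
      simp [Nat.add_comm]
    rw [hrange, List.map_append, List.map_map]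
    have h1 : (List.range cols.length).map (fun i =>
        (((r :: rs).getD (i / cols.length) "", cols.getD (i % cols.length) ""), l.getD i ""))
        = (cols.map (fun c => (r, c))).zip (l.take cols.length) := by
      rw [← pvRow_eq_zip r cols (l.take cols.length) (by simp only [List.length_take]; omega)]
      refine List.map_congr_left (fun i hi => ?_)
      rw [List.mem_range] at hi
      rw [Nat.div_eq_of_lt hi, Nat.mod_eq_of_lt hi, List.getD_cons_zero]
      congr 1
      simp [List.getD, hi]
    have h2 : (List.range (l.drop cols.length).length).map ((fun i =>
        (((r :: rs).getD (i / cols.length) "", cols.getD (i % cols.length) ""), l.getD i "")) ∘ (· + cols.length))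
        = (rs.flatMap (fun r => cols.map (fun c => (r, c)))).zip (l.drop cols.length) := by
      rw [← ih (l.drop cols.length) (by simp only [List.length_drop, h, List.length_cons, Nat.succ_mul]; omega) ]
      refine List.map_congr_left (fun i hi => ?_)
      simp only [Function.comp]
      rw [Nat.add_div_right i hcpos, Nat.add_mod_right, List.getD_cons_succ]
      congr 1
      simp [List.getD, List.getElem?_drop, Nat.add_comm]
    rw [h1, h2]
    conv_rhs => rw [hsplit]
    rw [List.flatMap_cons, List.zip_append (by simp; omega)]

theorem create_dict_reverse_mapping_from_iterable_spec_aux (rows cols l : List String)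
    (h : rows.length * cols.length = l.length) :
    create_dict_reverse_mapping_from_iterable rows cols l
      = create_dict_reverse_mapping_from_iterable_alt rows cols l := by
  unfold create_dict_reverse_mapping_from_iterable create_dict_reverse_mapping_from_iterable_alt
    create_matrix_from_iterable
  have hm : ((rows.length : Int) * (cols.length : Int) ≠ (l.length : Int)) = False := by
    simp [← h]
  simp only [hm, if_false, if_neg (by omega : ¬ rows.length * cols.length ≠ l.length),
    Int.toNat_natCast]
  have hl0 : ∀ (hc : cols.length = 0), l = [] := by
    intro hc
    rw [hc, Nat.mul_zero] at h
    exact List.length_eq_zero_iff.mp h.symm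
  -- both dict builds reduce to folds over the same pair list: the product keys zipped with l
  have keyA : (PySem.List.pyRange 0 (rows.length : Int) 1).foldl (fun d i =>
      (PySem.List.pyRange 0 (cols.length : Int) 1).foldl (fun d j =>
        d.insert (PySem.List.pyGetD rows i "", PySem.List.pyGetD cols j "")
                 (PySem.List.pyGetD (PySem.List.pyGetD (pvChunk cols.length l) i []) j "")) d)
      PySem.Dict.empty
      = PySem.Dict.ofList ((rows.flatMap (fun r => cols.map (fun c => (r, c)))).zip l) := by
    have hpairs : (List.range rows.length).flatMap (fun i => (List.range cols.length).map (fun j =>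
        ((rows.getD i "", cols.getD j ""), ((pvChunk cols.length l).getD i []).getD j "")))
          = (rows.flatMap (fun r => cols.map (fun c => (r, c)))).zip l := by
      by_cases hc : cols.length = 0
      · simp [hc, hl0 hc]
      · exact pvFlat_eq_zip cols rows l h.symm hc
    calc (PySem.List.pyRange 0 (rows.length : Int) 1).foldl (fun d i =>
          (PySem.List.pyRange 0 (cols.length : Int) 1).foldl (fun d j =>
            d.insert (PySem.List.pyGetD rows i "", PySem.List.pyGetD cols j "")
                     (PySem.List.pyGetD (PySem.List.pyGetD (pvChunk cols.length l) i []) j "")) d)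
          PySem.Dict.empty
        = ((List.range rows.length).flatMap (fun i => (List.range cols.length).map (fun j =>
            ((rows.getD i "", cols.getD j ""), ((pvChunk cols.length l).getD i []).getD j "")))).foldl
            (fun d p => d.insert p.1 p.2) PySem.Dict.empty := by
          rw [List.foldl_flatMap]
          simp only [PySem.List.pyRange_zero_nat]
          rw [List.foldl_map]
          refine PySem.List.foldl_congr_mem _ _ _ _ (fun d i _ => ?_)
          rw [List.foldl_map, List.foldl_map]
          refine PySem.List.foldl_congr_mem _ _ _ _ (fun d j _ => ?_)
          simp [PySem.List.pyGetD_natCast]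
      _ = PySem.Dict.ofList ((rows.flatMap (fun r => cols.map (fun c => (r, c)))).zip l) := by
          rw [hpairs]; rfl
  have keyB : (PySem.List.enumerate l 0).foldl (fun d p =>
      d.insert (PySem.List.pyGetD rows (PySem.Int.floordiv p.1 (cols.length : Int)) "",
                PySem.List.pyGetD cols (PySem.Int.mod p.1 (cols.length : Int)) "") p.2)
      PySem.Dict.empty
      = PySem.Dict.ofList ((rows.flatMap (fun r => cols.map (fun c => (r, c)))).zip l) := by
    have hpairs : (List.range l.length).map (fun i =>
        ((rows.getD (i / cols.length) "", cols.getD (i % cols.length) ""), l.getD i ""))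
          = (rows.flatMap (fun r => cols.map (fun c => (r, c)))).zip l := by
      by_cases hc : cols.length = 0
      · simp [hc, hl0 hc]
      · exact pvDivmod_eq_zip cols rows l h.symm hc
    calc (PySem.List.enumerate l 0).foldl (fun d p =>
          d.insert (PySem.List.pyGetD rows (PySem.Int.floordiv p.1 (cols.length : Int)) "",
                    PySem.List.pyGetD cols (PySem.Int.mod p.1 (cols.length : Int)) "") p.2)
          PySem.Dict.empty
        = ((List.range l.length).map (fun i =>
            ((rows.getD (i / cols.length) "", cols.getD (i % cols.length) ""), l.getD i ""))).foldl
            (fun d p => d.insert p.1 p.2) PySem.Dict.empty := by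
          rw [PySem.List.enumerate_eq_map_pyRange l ""]
          simp only [PySem.List.len, PySem.List.pyRange_zero_nat]
          rw [List.foldl_map, List.foldl_map, List.foldl_map]
          refine PySem.List.foldl_congr_mem _ _ _ _ (fun d i _ => ?_)
          rw [PySem.Int.floordiv_natCast, PySem.Int.mod_natCast, PySem.List.pyGetD_natCast,
            PySem.List.pyGetD_natCast, PySem.List.pyGetD_natCast]
      _ = PySem.Dict.ofList ((rows.flatMap (fun r => cols.map (fun c => (r, c)))).zip l) := by
          rw [hpairs]; rfl
  rw [keyA, keyB]

-- ===== VERDICT (by name: the statement is the Claim_ definition above) =====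
theorem create_dict_reverse_mapping_from_iterable_spec : Claim_equal_create_dict_reverse_mapping_from_iterable := by
  intro rows cols l _ hpre
  unfold Spec_create_dict_reverse_mapping_from_iterable
  exact create_dict_reverse_mapping_from_iterable_spec_aux rows cols l hpre
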